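-- pv_equiv track=rewrite | github.com/yheechan/crack | src/data/program_25.py | program_25
-- ===== SOURCE A (Python) =====
-- def program_25(N,K,V,W):
--     a = N
--     b = K
--     dic = {}
--     sum_value = []
--     sum_weight = 0
--     sort_arr = zip(W,V)
--     sort_arr = sorted(sort_arr, key=lambda x: x[0])
--     count = 0
--
--
--     for i in range(a):
--         sum_value.append(0)
--
--     for i in range(len(sort_arr)):
--         while i != len(sort_arr):
--             if sum_weight + sort_arr[i][0] <= b:
--                 sum_weight += sort_arr[i][0]
--                 sum_value[count] += sort_arr[i][1]
--
--             if sum_weight == b: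
--                 break
--
--             i += 1
--
--
--         sum_weight = 0
--         count += 1
--     return max(sum_value)
-- ===== SOURCE B (Python) =====
-- def program_25(N, K, V, W):
--     pairs = sorted(zip(W, V), key=lambda p: p[0])
--     L = len(pairs)
--     # prefix sums of sorted weights and values
--     PW = [0]
--     PV = [0]
--     for (w, v) in pairs:
--         PW.append(PW[-1] + w)
--         PV.append(PV[-1] + v)
--     best = 0 if N > L else None
--     # monotone stack of positions j (indices decreasing, PW[j+1] strictly
--     # decreasing along the list): the left-to-right records of the suffix
--     stack = []
--     for i in range(L - 1, -1, -1):
--         while stack and PW[stack[-1] + 1] <= PW[i + 1]: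
--             stack.pop()
--         stack.append(i)
--         if i < N:
--             x = K + PW[i]
--             if PW[stack[0] + 1] < x:
--                 # no prefix of the suffix ever reaches weight K: everything fits
--                 val = PV[L] - PV[i]
--             else:
--                 # binary search: largest stack position p with PW[stack[p]+1] >= x;
--                 # stack[p] is then the first j >= i with PW[j+1] - PW[i] >= K
--                 lo = 0
--                 hi = len(stack) - 1
--                 while lo < hi:
--                     mid = (lo + hi + 1) // 2
--                     if PW[stack[mid] + 1] >= x:
--                         lo = mid
--                     else:
--                         hi = mid - 1
--                 f = stack[lo]
--                 val = (PV[f + 1] - PV[i]) if (PW[f + 1] - PW[i] == K) else (PV[f] - PV[i])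
--             if best is None or val > best:
--                 best = val
--     return best
-- ===== Notes on version B (the rewrite author's own statement) =====
-- stated objective: faster
-- what changed: B replaces A's per-start greedy rescan of the sorted suffix by prefix sums over the sorted pairs, a monotone stack holding the running-maximum records of the suffix of prefix sums, and a binary search over that stack to find each start's first budget-crossing index in O(log n).
import Mathlib
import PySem

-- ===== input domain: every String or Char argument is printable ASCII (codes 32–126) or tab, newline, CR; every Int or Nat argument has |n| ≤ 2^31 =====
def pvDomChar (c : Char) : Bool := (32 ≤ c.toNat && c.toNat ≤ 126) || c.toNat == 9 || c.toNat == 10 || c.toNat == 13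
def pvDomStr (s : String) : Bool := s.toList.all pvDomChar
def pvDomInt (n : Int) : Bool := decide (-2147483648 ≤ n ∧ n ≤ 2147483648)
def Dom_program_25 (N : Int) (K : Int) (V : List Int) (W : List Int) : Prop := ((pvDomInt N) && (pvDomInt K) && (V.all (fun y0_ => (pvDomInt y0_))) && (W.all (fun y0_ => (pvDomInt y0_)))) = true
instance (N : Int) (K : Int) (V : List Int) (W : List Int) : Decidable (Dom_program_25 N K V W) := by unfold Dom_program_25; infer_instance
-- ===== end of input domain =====

-- B replaces A's per-start greedy rescan of the sorted suffix with prefix sums, a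
-- monotone stack of suffix records and a binary search per start (objective: faster).

-- ===== PORT A =====
-- inner 'while i != len(sort_arr)' loop: j is the (rebound) loop variable, sw = sum_weight,
-- sv = sum_value; sum_value[count] += … is sv.set (in range whenever count < sv.length,
-- which holds on every input Pre_ admits; Python raises IndexError outside that).
def innerA (arr : List (Int × Int)) (b : Int) (count : Nat) (j : Nat) (sw : Int) (sv : List Int) : List Int :=
  if h : j < arr.length then
    let p := arr[j]
    let fits := sw + p.1 ≤ b
    let sw' := if fits then sw + p.1 else sw
    let sv' := if fits then sv.set count (sv.getD count 0 + p.2) else sv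
    if sw' = b then sv'
    else innerA arr b count (j + 1) sw' sv'
  else sv
termination_by arr.length - j

def program_25 (N : Int) (K : Int) (V : List Int) (W : List Int) : Int :=
  let a := N
  let b := K
  let sort_arr := PySem.List.sorted (List.zip W V) (fun x => x.1) false
  -- for i in range(a): sum_value.append(0)
  let sum_value := (PySem.List.pyRange 0 a 1).foldl (fun sv _ => sv ++ [(0 : Int)]) []
  -- outer for-loop; sum_weight is reset to 0 and count incremented after each inner loop
  let final := (List.range sort_arr.length).foldl
      (fun (st : List Int × Nat) i => (innerA sort_arr b st.2 i 0 st.1, st.2 + 1))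
      (sum_value, 0)
  -- max(sum_value): no key; raises on an empty list, which Pre_ (1 ≤ N) rules out
  (PySem.List.max? final.1 (fun y => y)).getD 0

-- ===== PORT B =====
-- 'while stack and PW[stack[-1]+1] <= PW[i+1]: stack.pop()' — stack end = list end;
-- fuel = s.length bounds the pop count (structural, so the kernel can evaluate it)
def popWhileB (PW : List Int) (v : Int) : Nat → List Nat → List Nat
  | 0, s => s
  | fuel + 1, s =>
    if s ≠ [] ∧ PW.getD (s.getLast?.getD 0 + 1) 0 ≤ v then popWhileB PW v fuel s.dropLast
    else s

-- 'while lo < hi: mid = (lo+hi+1)//2; …' — all stack/PW indexings are in range when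
-- Python runs them (0 ≤ lo ≤ hi < len(stack)), where getD coincides with Python indexing;
-- fuel = s.length bounds the iteration count (hi - lo shrinks every round)
def bsearchB (PW : List Int) (s : List Nat) (x : Int) : Nat → Nat → Nat → Nat
  | 0, lo, _ => lo
  | fuel + 1, lo, hi =>
    if lo < hi then
      let mid := (lo + hi + 1) / 2
      if x ≤ PW.getD (s.getD mid 0 + 1) 0 then bsearchB PW s x fuel mid hi
      else bsearchB PW s x fuel lo (mid - 1)
    else lo

-- the per-start value: everything-fits branch, else binary search for the first crossing
def valB (K : Int) (PW PV : List Int) (L : Nat) (stack : List Nat) (i : Nat) : Int :=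
  let x := K + PW.getD i 0
  if PW.getD (stack.getD 0 0 + 1) 0 < x then PV.getD L 0 - PV.getD i 0
  else
    let f := stack.getD (bsearchB PW stack x stack.length 0 (stack.length - 1)) 0
    if PW.getD (f + 1) 0 - PW.getD i 0 = K then PV.getD (f + 1) 0 - PV.getD i 0
    else PV.getD f 0 - PV.getD i 0

-- one iteration of 'for i in range(L-1, -1, -1)': pop, push i, update best when i < N
def stepB (N K : Int) (PW PV : List Int) (L : Nat) (st : List Nat × Option Int) (i : Nat) : List Nat × Option Int :=
  let stack := popWhileB PW (PW.getD (i + 1) 0) st.1.length st.1 ++ [i]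
  if (i : Int) < N then
    (stack, some (match st.2 with
      | none => valB K PW PV L stack i
      | some b => if b < valB K PW PV L stack i then valB K PW PV L stack i else b))
  else (stack, st.2)

def program_25_alt (N : Int) (K : Int) (V : List Int) (W : List Int) : Int :=
  let pairs := PySem.List.sorted (List.zip W V) (fun p => p.1) false
  let L := pairs.length
  -- PW.append(PW[-1] + w); PV.append(PV[-1] + v)
  let PWPV := pairs.foldl (fun (acc : List Int × List Int) p =>
      (acc.1 ++ [acc.1.getLast?.getD 0 + p.1], acc.2 ++ [acc.2.getLast?.getD 0 + p.2]))
      ([0], [0])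
  -- 'best = 0 if N > L else None'; range(L-1,-1,-1) = reversed(range(L)) (exact, L ≥ 0)
  let fin := ((List.range L).reverse).foldl (stepB N K PWPV.1 PWPV.2 L)
      ([], if (L : Int) < N then some 0 else none)
  -- Python returns best; best is None only when N < 1, which Pre_ rules out
  fin.2.getD 0

-- ===== PRECONDITION & SPEC =====
-- Pre_ is exactly the set of inputs on which A returns: it excludes only inputs where A
-- raises — N < 1 (max() of the empty sum_value list: ValueError) and inputs with more than
-- N zipped pairs of weight ≤ K, where the scan from start position N writes past the end
-- of the N-slot sum_value list (IndexError).
def Pre_program_25 (N : Int) (K : Int) (V : List Int) (W : List Int) : Prop :=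
  1 ≤ N ∧ (((min W.length V.length : Nat) : Int) ≤ N ∨
    (((W.take (min W.length V.length)).countP (fun w => w ≤ K) : Nat) : Int) ≤ N)
instance (N : Int) (K : Int) (V : List Int) (W : List Int) : Decidable (Pre_program_25 N K V W) := by unfold Pre_program_25; infer_instance

def pvWitness_program_25 : Int × Int × List Int × List Int := (2, 3, [5, 1], [2, 2])

def Spec_program_25 (N : Int) (K : Int) (V : List Int) (W : List Int) (out : Int) : Prop := out = program_25_alt N K V W
instance (N : Int) (K : Int) (V : List Int) (W : List Int) (out : Int) : Decidable (Spec_program_25 N K V W out) := by unfold Spec_program_25; infer_instance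

-- ===== CLAIM (what is proved, stated in full; the proofs are below) =====
def Claim_equal_program_25 : Prop := ∀ (N : Int) (K : Int) (V : List Int) (W : List Int), Dom_program_25 N K V W → Pre_program_25 N K V W → Spec_program_25 N K V W (program_25 N K V W)

-- ===== LEMMAS AND PROOFS =====

-- ----- proof-level spec: the value A's inner scan (and B's formula) computes -----

-- greedy over a suffix, as A's inner loop computes it
def greedyB : List (Int × Int) → Int → Int → Int
  | [], _, total => total
  | (w, v) :: rest, rem, total =>
    if w ≤ rem then
      (if rem - w = 0 then total + v else greedyB rest (rem - w) (total + v))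
    else greedyB rest rem total

-- first-crossing value, structurally
def fvalSpec : List (Int × Int) → Int → Int
  | [], _ => 0
  | (w, v) :: rest, rem => if rem ≤ w then (if w = rem then v else 0) else v + fvalSpec rest (rem - w)

-- prefix sums of weights / values of the first j sorted pairs
def pwF (arr : List (Int × Int)) (j : Nat) : Int := ((arr.take j).map Prod.fst).sum
def pvF (arr : List (Int × Int)) (j : Nat) : Int := ((arr.take j).map Prod.snd).sum

-- the record list (top-first): indices j ∈ [i, L) whose PW[j+1] beats everything in [i, j)
def recsF (g : Nat → Int) (Lc : Nat) (i : Nat) : List Nat :=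
  if h : i < Lc then i :: (recsF g Lc (i + 1)).dropWhile (fun j => decide (g (j + 1) ≤ g (i + 1)))
  else []
termination_by Lc - i

-- spec of B's running best
def bestSpecF (vals : Nat → Int) (N : Int) (Lc : Nat) (i : Nat) : Option Int :=
  if h : i < Lc then
    let b := bestSpecF vals N Lc (i + 1)
    if (i : Int) < N then some (match b with | none => vals i | some bb => if bb < vals i then vals i else bb)
    else b
  else (if (Lc : Int) < N then some 0 else none)
termination_by Lc - i

-- ----- A-side lemmas (characterising A's loops) -----

lemma greedyB_of_forall_gt (l : List (Int × Int)) (rem total : Int)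
    (h : ∀ p ∈ l, ¬ p.1 ≤ rem) : greedyB l rem total = total := by
  induction l with
  | nil => rfl
  | cons p rest ih =>
    obtain ⟨w, v⟩ := p
    have hw := h (w, v) (by simp)
    simp only [greedyB, if_neg hw]
    exact ih (fun q hq => h q (by simp [hq]))

lemma innerA_noWrite (arr : List (Int × Int)) (b : Int) (count : Nat) :
    ∀ j sw (sv : List Int), (∀ p ∈ arr.drop j, ¬ sw + p.1 ≤ b) →
      innerA arr b count j sw sv = sv := by
  intro j
  induction hj : arr.length - j using Nat.strong_induction_on generalizing j with
  | _ fuel ih =>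
  intro sw sv hno
  by_cases h : j < arr.length
  · have hdrop : arr.drop j = arr[j] :: arr.drop (j + 1) := List.drop_eq_getElem_cons h
    have hfit : ¬ sw + arr[j].1 ≤ b := hno arr[j] (hdrop ▸ List.mem_cons_self)
    rw [innerA]
    simp only [dif_pos h, if_neg hfit]
    by_cases hb : sw = b
    · rw [if_pos hb]
    · rw [if_neg hb]
      exact ih (arr.length - (j + 1)) (by omega) (j + 1) rfl sw sv
        (fun p hp => hno p (hdrop ▸ List.mem_cons_of_mem _ hp))
  · rw [innerA]; simp [h]

lemma set_at_len (l1 l2 : List Int) (x y : Int) (k : Nat) (hk : k = l1.length) :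
    (l1 ++ x :: l2).set k y = l1 ++ y :: l2 := by
  subst hk; simp

lemma innerA_eq (arr : List (Int × Int)) (b : Int) (count : Nat)
    (hs : arr.Pairwise (fun p q => p.1 ≤ q.1)) :
    ∀ j sw (sv : List Int), count < sv.length →
      innerA arr b count j sw sv = sv.set count (greedyB (arr.drop j) (b - sw) (sv.getD count 0)) := by
  intro j
  induction hj : arr.length - j using Nat.strong_induction_on generalizing j with
  | _ fuel ih =>
  intro sw sv hc
  by_cases h : j < arr.length
  · have hdrop : arr.drop j = arr[j] :: arr.drop (j + 1) := List.drop_eq_getElem_cons h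
    rcases harr : arr[j] with ⟨w, v⟩
    rw [harr] at hdrop
    rw [innerA]
    simp only [dif_pos h, harr, hdrop]
    by_cases hfit : sw + w ≤ b
    · have hfit' : w ≤ b - sw := by omega
      simp only [if_pos hfit]
      by_cases hb : sw + w = b
      · have hz : b - sw - w = 0 := by omega
        simp [greedyB, hfit', hz, hb]
      · have hne : ¬ (b - sw) - w = 0 := by omega
        rw [if_neg hb, ih (arr.length - (j + 1)) (by omega) (j + 1) rfl (sw + w)
              (sv.set count (sv.getD count 0 + v)) (by simpa using hc)]
        have h1 : (sv.set count (sv.getD count 0 + v)).getD count 0 = sv.getD count 0 + v := by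
          simp [hc]
        have h2 : b - (sw + w) = b - sw - w := by ring
        rw [h1, List.set_set, h2]
        simp only [greedyB, if_pos hfit', if_neg hne]
    · have hfit' : ¬ w ≤ b - sw := by omega
      simp only [if_neg hfit]
      by_cases hb : sw = b
      · rw [if_pos hb]
        have hpw : (arr.drop j).Pairwise (fun p q => p.1 ≤ q.1) := hs.drop
        rw [hdrop] at hpw
        have hge : ∀ p ∈ (w, v) :: arr.drop (j + 1), ¬ p.1 ≤ b - sw := by
          intro p hp
          rcases List.mem_cons.mp hp with hp | hp
          · rw [hp]; exact hfit'
          · have := (List.pairwise_cons.mp hpw).1 p hp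
            simp only at this
            omega
        rw [greedyB_of_forall_gt _ _ _ hge, List.getD_eq_getElem sv 0 hc]
        exact (List.set_getElem_self hc).symm
      · rw [if_neg hb, ih (arr.length - (j + 1)) (by omega) (j + 1) rfl sw sv hc]
        simp [greedyB, hfit']
  · have hnil : arr.drop j = [] := List.drop_eq_nil_of_le (by omega)
    rw [innerA]
    simp only [dif_neg h, hnil, greedyB]
    rw [List.getD_eq_getElem sv 0 hc, List.set_getElem_self hc]

lemma mem_drop_getElem (arr : List (Int × Int)) (k : Nat) (p : Int × Int) (h : p ∈ arr.drop k) :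
    ∃ j, k ≤ j ∧ ∃ hj : j < arr.length, p = arr[j] := by
  obtain ⟨i, hi, rfl⟩ := List.mem_iff_getElem.mp h
  exact ⟨k + i, by omega, by simp at hi; omega, by rw [List.getElem_drop]⟩

lemma outer_inv (arr : List (Int × Int)) (b : Int) (M : Nat)
    (hs : arr.Pairwise (fun p q => p.1 ≤ q.1))
    (hdead : ∀ i, min M arr.length ≤ i → ∀ hi : i < arr.length, ¬ arr[i].1 ≤ b) :
    ∀ k, k ≤ arr.length →
      (List.range k).foldl
          (fun (st : List Int × Nat) i => (innerA arr b st.2 i 0 st.1, st.2 + 1))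
          (List.replicate M 0, 0)
        = ((List.range (min k (min M arr.length))).map (fun i => greedyB (arr.drop i) b 0)
            ++ List.replicate (M - min k (min M arr.length)) 0, k) := by
  intro k
  induction k with
  | zero => simp
  | succ k ih =>
    intro hk
    rw [List.range_succ, List.foldl_append, ih (by omega), List.foldl_cons, List.foldl_nil]
    by_cases hlive : k < min M arr.length
    · have hmk : min k (min M arr.length) = k := by omega
      have hmk1 : min (k + 1) (min M arr.length) = k + 1 := by omega
      rw [hmk, hmk1]
      have hlen : ((List.range k).map (fun i => greedyB (arr.drop i) b 0)).length = k := by simp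
      have hrep : List.replicate (M - k) (0 : Int) = (0 : Int) :: List.replicate (M - (k + 1)) 0 := by
        have : M - k = (M - (k + 1)) + 1 := by omega
        rw [this, List.replicate_succ]
      rw [hrep]
      have hc : k < (((List.range k).map (fun i => greedyB (arr.drop i) b 0)) ++
          (0 : Int) :: List.replicate (M - (k + 1)) 0).length := by simp
      rw [innerA_eq arr b k hs k 0 _ hc]
      have hgd : (((List.range k).map (fun i => greedyB (arr.drop i) b 0)) ++
          (0 : Int) :: List.replicate (M - (k + 1)) 0).getD k 0 = 0 := by
        rw [List.getD_eq_getElem _ 0 hc]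
        simp [List.getElem_append_right, hlen]
      rw [hgd, sub_zero, set_at_len _ _ _ _ _ hlen.symm, List.range_succ]
      simp
    · have hmk : min (k + 1) (min M arr.length) = min k (min M arr.length) := by omega
      rw [hmk, innerA_noWrite arr b k k 0 _ ?_]
      intro p hp
      obtain ⟨j, hkj, hj, rfl⟩ := mem_drop_getElem arr k p hp
      have := hdead j (by omega) hj
      omega

lemma map_fst_zip_take (W V : List Int) :
    List.map Prod.fst (W.zip V) = W.take (min W.length V.length) := by
  induction W generalizing V with
  | nil => simp
  | cons w ws ih =>
    cases V with
    | nil => simp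
    | cons v vs => simp [ih]

-- greedy = first-crossing value, on a weight-sorted list
lemma greedyB_eq_fval (l : List (Int × Int)) (hs : l.Pairwise (fun p q => p.1 ≤ q.1)) :
    ∀ rem tot, greedyB l rem tot = tot + fvalSpec l rem := by
  induction l with
  | nil => intro rem tot; simp [greedyB, fvalSpec]
  | cons p rest ih =>
    obtain ⟨w, v⟩ := p
    intro rem tot
    by_cases hle : w ≤ rem
    · by_cases heq : w = rem
      · subst heq
        simp [greedyB, fvalSpec]
      · by_cases hlt : rem ≤ w
        · omega
        · have hz : ¬ rem - w = 0 := by omega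
          simp only [greedyB, fvalSpec, if_pos hle, if_neg hz, if_neg hlt]
          rw [ih (List.pairwise_cons.mp hs).2 (rem - w) (tot + v)]
          ring
    · have hrw : rem ≤ w := by omega
      have hne : w ≠ rem := by omega
      simp only [greedyB, fvalSpec, if_neg hle, if_pos hrw, if_neg hne]
      rw [greedyB_of_forall_gt rest rem tot ?_, add_zero]
      intro q hq
      have := (List.pairwise_cons.mp hs).1 q hq
      simp only at this
      omega

-- ----- B-side lemmas -----

lemma getD_map_range (f : Nat → Int) (n j : Nat) (h : j < n) :
    ((List.range n).map f).getD j 0 = f j := by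
  rw [List.getD_eq_getElem _ 0 (by simpa using h)]
  simp

-- the prefix-sum builder produces exactly the maps of pwF / pvF
lemma prefix_build (arr : List (Int × Int)) :
    arr.foldl (fun (acc : List Int × List Int) p =>
      (acc.1 ++ [acc.1.getLast?.getD 0 + p.1], acc.2 ++ [acc.2.getLast?.getD 0 + p.2]))
      ([0], [0])
    = ((List.range (arr.length + 1)).map (pwF arr), (List.range (arr.length + 1)).map (pvF arr)) := by
  induction arr using List.reverseRecOn with
  | nil => simp [pwF, pvF]
  | append_singleton l a ih =>
    have hmapw : (List.range (l.length + 1)).map (pwF (l ++ [a])) = (List.range (l.length + 1)).map (pwF l) := by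
      apply List.map_congr_left
      intro j hj
      have hj' : j ≤ l.length := by simpa using Nat.lt_succ_iff.mp (List.mem_range.mp hj)
      unfold pwF
      rw [List.take_append_of_le_length hj']
    have hmapv : (List.range (l.length + 1)).map (pvF (l ++ [a])) = (List.range (l.length + 1)).map (pvF l) := by
      apply List.map_congr_left
      intro j hj
      have hj' : j ≤ l.length := by simpa using Nat.lt_succ_iff.mp (List.mem_range.mp hj)
      unfold pvF
      rw [List.take_append_of_le_length hj']
    have hlast : ∀ f : Nat → Int, ((List.range (l.length + 1)).map f).getLast?.getD 0 = f l.length := by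
      intro f
      rw [List.range_succ, List.map_append]
      simp
    have hw1 : pwF (l ++ [a]) (l.length + 1) = pwF l l.length + a.1 := by
      unfold pwF
      rw [List.take_of_length_le (by simp), List.take_of_length_le (by simp)]
      simp
    have hv1 : pvF (l ++ [a]) (l.length + 1) = pvF l l.length + a.2 := by
      unfold pvF
      rw [List.take_of_length_le (by simp), List.take_of_length_le (by simp)]
      simp
    have hR : (List.range ((l ++ [a]).length + 1)).map (pwF (l ++ [a]))
        = (List.range (l.length + 1)).map (pwF l) ++ [pwF l l.length + a.1] := by
      rw [show (l ++ [a]).length + 1 = (l.length + 1) + 1 by simp, List.range_succ,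
          List.map_append, hmapw]
      simp [hw1]
    have hRv : (List.range ((l ++ [a]).length + 1)).map (pvF (l ++ [a]))
        = (List.range (l.length + 1)).map (pvF l) ++ [pvF l l.length + a.2] := by
      rw [show (l ++ [a]).length + 1 = (l.length + 1) + 1 by simp, List.range_succ,
          List.map_append, hmapv]
      simp [hv1]
    rw [List.foldl_append, ih, List.foldl_cons, List.foldl_nil, hR, hRv]
    dsimp only
    rw [hlast (pwF l), hlast (pvF l)]

-- pwF sum step
lemma pwF_succ (arr : List (Int × Int)) (i : Nat) (h : i < arr.length) :
    pwF arr (i + 1) = pwF arr i + (arr[i]).1 := by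
  unfold pwF
  rw [List.map_take, List.map_take, List.sum_take_succ _ i (by simpa using h)]
  simp

lemma pvF_succ (arr : List (Int × Int)) (i : Nat) (h : i < arr.length) :
    pvF arr (i + 1) = pvF arr i + (arr[i]).2 := by
  unfold pvF
  rw [List.map_take, List.map_take, List.sum_take_succ _ i (by simpa using h)]
  simp

-- first-crossing value via find? on prefix sums
lemma fval_eq_find (arr : List (Int × Int)) :
    ∀ i, i ≤ arr.length → ∀ rem : Int,
      fvalSpec (arr.drop i) rem =
        (match (List.range' i (arr.length - i)).find? (fun j => decide (rem + pwF arr i ≤ pwF arr (j + 1))) with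
          | none => pvF arr arr.length - pvF arr i
          | some f => if pwF arr (f + 1) = rem + pwF arr i then pvF arr (f + 1) - pvF arr i
                      else pvF arr f - pvF arr i) := by
  intro i
  induction hfi : arr.length - i using Nat.strong_induction_on generalizing i with
  | _ fuel ih =>
  intro hi rem
  by_cases h : i < arr.length
  · have hdrop : arr.drop i = arr[i] :: arr.drop (i + 1) := List.drop_eq_getElem_cons h
    rcases harr : arr[i] with ⟨w, v⟩
    have hw : pwF arr (i + 1) = pwF arr i + w := by rw [pwF_succ arr i h, harr]
    have hv : pvF arr (i + 1) = pvF arr i + v := by rw [pvF_succ arr i h, harr]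
    have hrange : List.range' i fuel = i :: List.range' (i + 1) (arr.length - (i + 1)) := by
      rw [← hfi, show arr.length - i = (arr.length - (i + 1)) + 1 by omega, List.range'_succ]
    rw [hdrop, hrange, harr]
    by_cases hq : rem ≤ w
    · rw [List.find?_cons_of_pos (by simp only [hw, decide_eq_true_eq]; omega)]
      simp only [fvalSpec]
      rw [if_pos hq]
      by_cases he : w = rem
      · rw [if_pos he, if_pos (by rw [hw]; omega), hv]
        ring
      · rw [if_neg he, if_neg (by rw [hw]; intro hc; apply he; omega)]
        ring
    · have hq' : ¬ (rem + pwF arr i ≤ pwF arr (i + 1)) := by rw [hw]; omega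
      rw [List.find?_cons_of_neg (by simpa using hq')]
      simp only [fvalSpec]
      rw [if_neg hq]
      have hx : rem - w + pwF arr (i + 1) = rem + pwF arr i := by rw [hw]; ring
      have hIH := ih (arr.length - (i + 1)) (by omega) (i + 1) rfl (by omega) (rem - w)
      rw [hIH, hx]
      rcases hfind : (List.range' (i + 1) (arr.length - (i + 1))).find?
          (fun j => decide (rem + pwF arr i ≤ pwF arr (j + 1))) with _ | f
      · simp only []
        rw [hv]; ring
      · simp only []
        split_ifs <;> (rw [hv]; ring)
  · have hieq : i = arr.length := by omega
    subst hieq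
    have hf0 : fuel = 0 := by omega
    subst hf0
    simp [List.drop_length, fvalSpec]

lemma dropWhile_head_false {α : Type} (p : α → Bool) :
    ∀ (l : List α) b rest, l.dropWhile p = b :: rest → p b = false := by
  intro l
  induction l with
  | nil => intro b rest h; simp at h
  | cons a t ih =>
    intro b rest h
    rw [List.dropWhile_cons] at h
    by_cases hp : p a
    · rw [if_pos hp] at h
      exact ih _ _ h
    · rw [if_neg hp] at h
      injection h with h1 _
      subst h1
      simpa using hp

-- record-list properties: bounds, double monotonicity, completeness
lemma recs_bounds (g : Nat → Int) (Lc : Nat) : ∀ i, ∀ j ∈ recsF g Lc i, i ≤ j ∧ j < Lc := by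
  intro i
  induction hfi : Lc - i using Nat.strong_induction_on generalizing i with
  | _ fuel ih =>
  intro j hj
  rw [recsF] at hj
  by_cases h : i < Lc
  · rw [dif_pos h] at hj
    rcases List.mem_cons.mp hj with rfl | hj'
    · exact ⟨le_rfl, h⟩
    · have hj'' : j ∈ recsF g Lc (i + 1) := (List.dropWhile_sublist _).subset hj'
      have := ih (Lc - (i + 1)) (by omega) (i + 1) rfl j hj''
      exact ⟨by omega, this.2⟩
  · rw [dif_neg h] at hj
    simp at hj

lemma recs_pairwise (g : Nat → Int) (Lc : Nat) :
    ∀ i, (recsF g Lc i).Pairwise (fun a b => a < b ∧ g (a + 1) < g (b + 1)) := by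
  intro i
  induction hfi : Lc - i using Nat.strong_induction_on generalizing i with
  | _ fuel ih =>
  rw [recsF]
  by_cases h : i < Lc
  · rw [dif_pos h]
    have hR' := ih (Lc - (i + 1)) (by omega) (i + 1) rfl
    have hpwD : (List.dropWhile (fun j => decide (g (j + 1) ≤ g (i + 1))) (recsF g Lc (i + 1))).Pairwise
        (fun a b => a < b ∧ g (a + 1) < g (b + 1)) :=
      hR'.sublist (List.dropWhile_sublist _)
    refine List.pairwise_cons.mpr ⟨?_, hpwD⟩
    intro b hb
    have hbR : b ∈ recsF g Lc (i + 1) := (List.dropWhile_sublist _).subset hb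
    have hlt : i < b := by
      have := recs_bounds g Lc (i + 1) b hbR
      omega
    refine ⟨hlt, ?_⟩
    rcases hD : List.dropWhile (fun j => decide (g (j + 1) ≤ g (i + 1))) (recsF g Lc (i + 1)) with _ | ⟨b0, rest⟩
    · rw [hD] at hb; simp at hb
    · have hb0 : ¬ g (b0 + 1) ≤ g (i + 1) := by
        have := dropWhile_head_false (fun j => decide (g (j + 1) ≤ g (i + 1))) _ _ _ hD
        simpa using this
      rw [hD] at hb hpwD
      rcases List.mem_cons.mp hb with rfl | hbrest
      · omega
      · have := (List.pairwise_cons.mp hpwD).1 b hbrest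
        omega
  · rw [dif_neg h]
    exact List.Pairwise.nil

lemma recs_complete (g : Nat → Int) (Lc : Nat) :
    ∀ i j, i ≤ j → j < Lc → (∀ j', i ≤ j' → j' < j → g (j' + 1) < g (j + 1)) → j ∈ recsF g Lc i := by
  intro i
  induction hfi : Lc - i using Nat.strong_induction_on generalizing i with
  | _ fuel ih =>
  intro j hij hjL hrec
  rw [recsF, dif_pos (by omega)]
  rcases Nat.eq_or_lt_of_le hij with rfl | hlt
  · exact List.mem_cons_self
  · have hjR : j ∈ recsF g Lc (i + 1) :=
      ih (Lc - (i + 1)) (by omega) (i + 1) rfl j (by omega) hjL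
        (fun j' h1 h2 => hrec j' (by omega) h2)
    have hpj : ¬ g (j + 1) ≤ g (i + 1) := by
      have := hrec i le_rfl hlt
      omega
    apply List.mem_cons_of_mem
    have hsplit := List.takeWhile_append_dropWhile
      (p := fun j' => decide (g (j' + 1) ≤ g (i + 1))) (l := recsF g Lc (i + 1))
    rw [← hsplit] at hjR
    rcases List.mem_append.mp hjR with htw | hdw
    · have := List.mem_takeWhile_imp htw
      simp at this
      omega
    · exact hdw

-- popWhileB on a reversed list is reversed dropWhile
lemma popWhileB_rev (PW : List Int) (v : Int) :
    ∀ (fuel : Nat) (r : List Nat), r.length ≤ fuel →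
      popWhileB PW v fuel r.reverse = (r.dropWhile (fun j => decide (PW.getD (j + 1) 0 ≤ v))).reverse := by
  intro fuel
  induction fuel with
  | zero =>
    intro r hr
    have : r = [] := List.eq_nil_of_length_eq_zero (by omega)
    subst this; rfl
  | succ fuel ih =>
    intro r hr
    cases r with
    | nil => rfl
    | cons a t =>
      rw [popWhileB]
      have hrev : (a :: t).reverse = t.reverse ++ [a] := by simp
      by_cases hp : PW.getD (a + 1) 0 ≤ v
      · have hpa : decide (PW.getD (a + 1) 0 ≤ v) = true := by
          simpa using hp
        rw [if_pos ?_]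
        · rw [hrev, List.dropLast_concat]
          rw [ih t (by simpa using Nat.succ_le_succ_iff.mp hr)]
          rw [List.dropWhile_cons, if_pos hpa]
        · constructor
          · simp [hrev]
          · rw [hrev, List.getLast?_concat]
            simpa using hp
      · have hpa : decide (PW.getD (a + 1) 0 ≤ v) = false := by
          simpa using hp
        rw [if_neg ?_]
        · rw [List.dropWhile_cons, if_neg (by simpa [List.getD, not_le] using hp)]
        · rw [hrev, List.getLast?_concat]
          simp only [not_and, Option.getD_some]
          intro
          simpa [List.getD, not_le] using hp

-- binary-search correctness on a stack with strictly decreasing PW[j+1]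
lemma bsearch_correct (PW : List Int) (x : Int) (s : List Nat)
    (hanti : ∀ p q (hp : p < s.length) (hq : q < s.length), p < q →
      PW.getD (s[q] + 1) 0 < PW.getD (s[p] + 1) 0) :
    ∀ fuel lo hi, hi - lo < fuel → hi < s.length → lo ≤ hi → x ≤ PW.getD (s.getD lo 0 + 1) 0 →
      (∀ p, hi < p → p < s.length → PW.getD (s.getD p 0 + 1) 0 < x) →
      lo ≤ bsearchB PW s x fuel lo hi ∧ bsearchB PW s x fuel lo hi ≤ hi ∧
      x ≤ PW.getD (s.getD (bsearchB PW s x fuel lo hi) 0 + 1) 0 ∧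
      (∀ p, bsearchB PW s x fuel lo hi < p → p < s.length → PW.getD (s.getD p 0 + 1) 0 < x) := by
  intro fuel
  induction fuel with
  | zero => intro lo hi hf; omega
  | succ fuel ih =>
    intro lo hi hf hhi hlohi hqlo htail
    rw [bsearchB]
    by_cases h : lo < hi
    · rw [if_pos h]
      simp only []
      by_cases hm : x ≤ PW.getD (s.getD ((lo + hi + 1) / 2) 0 + 1) 0
      · rw [if_pos hm]
        have hres := ih ((lo + hi + 1) / 2) hi (by omega) hhi (by omega) hm htail
        exact ⟨by omega, hres.2⟩
      · rw [if_neg hm]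
        have htail' : ∀ p, (lo + hi + 1) / 2 - 1 < p → p < s.length → PW.getD (s.getD p 0 + 1) 0 < x := by
          intro p hp hps
          by_cases hph : hi < p
          · exact htail p hph hps
          · have hmidlen : (lo + hi + 1) / 2 < s.length := by omega
            rcases Nat.eq_or_lt_of_le (show (lo + hi + 1) / 2 ≤ p by omega) with rfl | hplt
            · omega
            · have := hanti ((lo + hi + 1) / 2) p hmidlen hps hplt
              rw [List.getD_eq_getElem _ 0 hps, List.getD_eq_getElem _ 0 hmidlen] at *
              omega
        have hres := ih lo ((lo + hi + 1) / 2 - 1) (by omega) (by omega) (by omega) hqlo htail'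
        exact ⟨hres.1, by omega, hres.2.2⟩
    · rw [if_neg h]
      have heq : lo = hi := by omega
      subst heq
      exact ⟨le_rfl, le_rfl, hqlo, htail⟩

-- find? returns the element at the first satisfying index
lemma find?_eq_getElem_of {α : Type} (l : List α) (p : α → Bool) (k : Nat) (hk : k < l.length)
    (h1 : p l[k] = true) (h2 : ∀ m (hm : m < k), p (l[m]'(by omega)) = false) :
    l.find? p = some l[k] := by
  induction l generalizing k with
  | nil => simp at hk
  | cons a t ih =>
    cases k with
    | zero =>
      simp only [List.getElem_cons_zero] at h1 ⊢
      simp [List.find?, h1]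
    | succ k =>
      have h0 : p a = false := by
        have := h2 0 (by omega)
        simpa using this
      simp only [List.find?, h0]
      exact ih k (by simpa using hk) (by simpa using h1)
        (fun m hm => by simpa using h2 (m + 1) (by omega))

lemma find?_congr_mem {α : Type} (l : List α) (p q : α → Bool) (h : ∀ a ∈ l, p a = q a) :
    l.find? p = l.find? q := by
  induction l with
  | nil => rfl
  | cons a t ih =>
    have ha := h a List.mem_cons_self
    by_cases hq : q a = true
    · rw [List.find?_cons_of_pos (by rw [ha]; exact hq), List.find?_cons_of_pos hq]
    · have hqa : q a = false := Bool.eq_false_iff.mpr hq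
      rw [List.find?_cons_of_neg (by simp [ha, hqa]), List.find?_cons_of_neg (by simp [hqa])]
      exact ih (fun a ha => h a (List.mem_cons_of_mem _ ha))

lemma find?_some_first {α : Type} (l : List α) (p : α → Bool) (b : α) (h : l.find? p = some b) :
    ∃ k, ∃ hk : k < l.length, l[k] = b ∧ p b = true ∧ ∀ m (hm : m < k), p (l[m]'(by omega)) = false := by
  induction l with
  | nil => simp at h
  | cons a t ih =>
    by_cases hp : p a = true
    · rw [List.find?_cons_of_pos hp] at h
      obtain rfl : a = b := by injection h
      exact ⟨0, by simp, rfl, hp, fun m hm => by omega⟩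
    · rw [List.find?_cons_of_neg (by simpa using hp)] at h
      obtain ⟨k, hk, hget, hpb, hfirst⟩ := ih h
      refine ⟨k + 1, by simpa using Nat.succ_lt_succ hk, by simpa using hget, hpb, ?_⟩
      intro m hm
      cases m with
      | zero => simpa using hp
      | succ m => simpa using hfirst m (by omega)

-- the value B computes at start i equals the first-crossing value of the suffix
lemma valB_eq (arr : List (Int × Int)) (K : Int) (i : Nat) (hi : i < arr.length) :
    valB K ((List.range (arr.length + 1)).map (pwF arr)) ((List.range (arr.length + 1)).map (pvF arr))
      arr.length ((recsF (fun j => ((List.range (arr.length + 1)).map (pwF arr)).getD j 0) arr.length i).reverse) i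
    = fvalSpec (arr.drop i) K := by
  set L := arr.length with hL
  set PW := (List.range (L + 1)).map (pwF arr) with hPW
  set PV := (List.range (L + 1)).map (pvF arr) with hPV
  set g : Nat → Int := fun j => PW.getD j 0 with hg
  have hgj : ∀ j, j ≤ L → g j = pwF arr j := by
    intro j hj
    rw [hg]
    exact getD_map_range (pwF arr) (L + 1) j (by omega)
  have hvj : ∀ j, j ≤ L → PV.getD j 0 = pvF arr j := by
    intro j hj
    exact getD_map_range (pvF arr) (L + 1) j (by omega)
  set R := recsF g L i with hR
  have hRcons : R = i :: (recsF g L (i + 1)).dropWhile (fun j => decide (g (j + 1) ≤ g (i + 1))) := by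
    rw [hR, recsF, dif_pos hi]
  have hRne : R ≠ [] := by rw [hRcons]; simp
  have hbnd := recs_bounds g L i
  have hpw := recs_pairwise g L i
  rw [← hR] at hbnd hpw
  set s := R.reverse with hs
  have hslen : s.length = R.length := by simp [hs]
  have hsne : 0 < s.length := by
    rw [hslen]
    exact List.length_pos_iff.mpr hRne
  have hsget : ∀ p (hp : p < s.length), s[p] = R[R.length - 1 - p]'(by omega) := by
    intro p hp
    have h1 : s[p] = R.reverse[p]'(by simp only [List.length_reverse]; omega) := List.getElem_of_eq hs hp
    rw [h1, List.getElem_reverse]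
  have hsmem : ∀ p (hp : p < s.length), i ≤ s[p] ∧ s[p] < L := by
    intro p hp
    rw [hsget p hp]
    exact hbnd _ (List.getElem_mem _)
  have hRpair := List.pairwise_iff_getElem.mp hpw
  have hanti : ∀ p q (hp : p < s.length) (hq : q < s.length), p < q →
      PW.getD (s[q] + 1) 0 < PW.getD (s[p] + 1) 0 := by
    intro p q hp hq hpq
    rw [hsget p hp, hsget q hq]
    have := hRpair (R.length - 1 - q) (R.length - 1 - p) (by omega) (by omega) (by omega)
    exact this.2
  have hsidx : ∀ p q (hp : p < s.length) (hq : q < s.length), p < q → s[q] < s[p] := by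
    intro p q hp hq hpq
    rw [hsget p hp, hsget q hq]
    exact (hRpair (R.length - 1 - q) (R.length - 1 - p) (by omega) (by omega) (by omega)).1
  -- the RHS, via the first-crossing characterisation
  rw [fval_eq_find arr i (by omega) K]
  have hpredeq : ∀ j ∈ List.range' i (L - i),
      (decide (K + g i ≤ g (j + 1))) = (decide (K + pwF arr i ≤ pwF arr (j + 1))) := by
    intro j hj
    have hjr := List.mem_range'_1.mp hj
    rw [hgj (j + 1) (by omega), hgj i (by omega)]
  rw [← find?_congr_mem (List.range' i (L - i)) (fun j => decide (K + g i ≤ g (j + 1)))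
        (fun j => decide (K + pwF arr i ≤ pwF arr (j + 1))) hpredeq]
  unfold valB
  rw [show K + PW.getD i 0 = K + g i from rfl]
  by_cases hb : PW.getD (s.getD 0 0 + 1) 0 < K + g i
  · rw [if_pos hb]
    -- nothing in [i, L) crosses: the bottom record carries the maximum prefix sum
    have hnone : (List.range' i (L - i)).find? (fun j => decide (K + g i ≤ g (j + 1))) = none := by
      rcases hfind : (List.range' i (L - i)).find? (fun j => decide (K + g i ≤ g (j + 1))) with _ | j0
      · rfl
      · exfalso
        obtain ⟨k, hk, hget, hpj0, hfirst⟩ := find?_some_first _ _ _ hfind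
        have hklen : (List.range' i (L - i)).length = L - i := List.length_range'
        have hj0 : j0 = i + k := by rw [← hget, List.getElem_range'_1]
        have hj0L : j0 < L := by omega
        have hj0rec : j0 ∈ R := by
          rw [hR]
          apply recs_complete g L i j0 (by omega) hj0L
          intro j' h1 h2
          have := hfirst (j' - i) (by omega)
          rw [List.getElem_range'_1] at this
          have h3 : i + (j' - i) = j' := by omega
          rw [h3] at this
          simp only [decide_eq_false_iff_not, not_le] at this
          have h4 : K + g i ≤ g (j0 + 1) := by simpa using hpj0
          omega
        obtain ⟨kr, hkr, hkrget⟩ := List.mem_iff_getElem.mp hj0rec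
        have hple : g (j0 + 1) ≤ g (s.getD 0 0 + 1) := by
          have h0 : s.getD 0 0 = s[0] := List.getD_eq_getElem s 0 hsne
          rw [h0, hsget 0 hsne]
          rcases Nat.eq_or_lt_of_le (show kr ≤ R.length - 1 by omega) with heq | hlt
          · have hidx : R[R.length - 1 - 0]'(by omega) = R[kr] := getElem_congr_idx (by omega)
            rw [hidx, hkrget]
          · have hmono := hRpair kr (R.length - 1) (by omega) (by omega) hlt
            rw [hkrget] at hmono
            have hidx : R[R.length - 1 - 0]'(by omega) = R[R.length - 1]'(by omega) := getElem_congr_idx (by omega)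
            rw [hidx]
            exact le_of_lt hmono.2
        have h4 : K + g i ≤ g (j0 + 1) := by simpa using hpj0
        have h5 : PW.getD (s.getD 0 0 + 1) 0 = g (s.getD 0 0 + 1) := rfl
        omega
    rw [hnone]
    rw [hvj L le_rfl, hvj i (by omega)]
  · rw [if_neg hb]
    -- binary search: the returned stack entry is the first crossing index
    have hq0 : K + g i ≤ PW.getD (s.getD 0 0 + 1) 0 := by omega
    have hres := bsearch_correct PW (K + g i) s hanti s.length 0 (s.length - 1)
      (by omega) (by omega) (by omega) hq0 (by intro p h1 h2; omega)
    set r := bsearchB PW s (K + g i) s.length 0 (s.length - 1) with hr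
    obtain ⟨-, hrle, hqr, hrtail⟩ := hres
    have hrlen : r < s.length := by omega
    have hfget : s.getD r 0 = s[r] := List.getD_eq_getElem s 0 hrlen
    set f := s[r] with hf
    have hfL : f < L := (hsmem r hrlen).2
    have hfi2 : i ≤ f := (hsmem r hrlen).1
    have hqf : K + g i ≤ g (f + 1) := by
      rw [hfget] at hqr
      exact hqr
    -- the find? over the range returns exactly f
    have hsome : (List.range' i (L - i)).find? (fun j => decide (K + g i ≤ g (j + 1))) = some f := by
      have hklen : (List.range' i (L - i)).length = L - i := List.length_range'
      have hfpos : f - i < (List.range' i (L - i)).length := by omega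
      have := find?_eq_getElem_of (List.range' i (L - i)) (fun j => decide (K + g i ≤ g (j + 1)))
        (f - i) hfpos ?_ ?_
      · rw [this, List.getElem_range'_1, show i + (f - i) = f by omega]
      · rw [List.getElem_range'_1, show i + (f - i) = f by omega]
        simpa using hqf
      · intro m hm
        rw [List.getElem_range'_1]
        set j' := i + m with hj'
        simp only [decide_eq_false_iff_not, not_le]
        by_contra hcon
        push_neg at hcon
        -- j' < f satisfies the test; its first occurrence is a record on the stack above r: contradiction
        have hj'L : j' < L := by omega
        -- take the first satisfier j0 ≤ j'
        rcases hfind : (List.range' i (L - i)).find? (fun j => decide (K + g i ≤ g (j + 1))) with _ | j0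
        · rw [List.find?_eq_none] at hfind
          have := hfind j' (List.mem_range'_1.mpr ⟨by omega, by omega⟩)
          simp at this
          omega
        · obtain ⟨k, hk, hget, hpj0, hfirst⟩ := find?_some_first _ _ _ hfind
          have hj0 : j0 = i + k := by rw [← hget, List.getElem_range'_1]
          have hj0j' : j0 ≤ j' := by
            by_contra hcc
            push_neg at hcc
            have := hfirst (j' - i) (by omega)
            rw [List.getElem_range'_1, show i + (j' - i) = j' by omega] at this
            simp only [decide_eq_false_iff_not, not_le] at this
            omega
          have hj0L : j0 < L := by omega
          have h4 : K + g i ≤ g (j0 + 1) := by simpa using hpj0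
          have hj0rec : j0 ∈ R := by
            rw [hR]
            apply recs_complete g L i j0 (by omega) hj0L
            intro ja h1 h2
            have := hfirst (ja - i) (by omega)
            rw [List.getElem_range'_1, show i + (ja - i) = ja by omega] at this
            simp only [decide_eq_false_iff_not, not_le] at this
            omega
          obtain ⟨kr, hkr, hkrget⟩ := List.mem_iff_getElem.mp hj0rec
          set p0 := R.length - 1 - kr with hp0
          have hp0len : p0 < s.length := by omega
          have hsp0 : s[p0] = j0 := by
            rw [hsget p0 hp0len]
            have hidx : R[R.length - 1 - p0]'(by omega) = R[kr] := getElem_congr_idx (by omega)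
            rw [hidx]
            exact hkrget
          have hp0r : p0 ≤ r := by
            by_contra hcc
            push_neg at hcc
            have := hrtail p0 hcc hp0len
            rw [List.getD_eq_getElem s 0 hp0len, hsp0] at this
            have h5 : PW.getD (j0 + 1) 0 = g (j0 + 1) := rfl
            omega
          have : f ≤ j0 := by
            rcases Nat.eq_or_lt_of_le hp0r with heq | hlt
            · rw [← hsp0, hf]
              exact le_of_eq (getElem_congr_idx heq).symm
            · have := hsidx p0 r hp0len hrlen hlt
              rw [hsp0] at this
              omega
          omega
    rw [hsome, hfget]
    dsimp only
    rw [show PW.getD (f + 1) 0 = g (f + 1) from rfl, show PW.getD i 0 = g i from rfl,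
        hgj (f + 1) (by omega), hgj i (by omega),
        hvj (f + 1) (by omega), hvj i (by omega), hvj f (by omega)]
    split_ifs with h1 h2 h2 <;> first | rfl | (exfalso; omega)

-- the loop invariant: stack is the reversed record list, best is bestSpecF
lemma loop_inv (arr : List (Int × Int)) (N K : Int) :
    ∀ i, i ≤ arr.length →
      (List.range' i (arr.length - i)).reverse.foldl
          (stepB N K ((List.range (arr.length + 1)).map (pwF arr)) ((List.range (arr.length + 1)).map (pvF arr)) arr.length)
          ([], if (arr.length : Int) < N then some 0 else none)
      = ((recsF (fun j => ((List.range (arr.length + 1)).map (pwF arr)).getD j 0) arr.length i).reverse,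
         bestSpecF (fun j => fvalSpec (arr.drop j) K) N arr.length i) := by
  intro i
  induction hfi : arr.length - i using Nat.strong_induction_on generalizing i with
  | _ fuel ih =>
  intro hi
  by_cases h : i < arr.length
  · have hcons : List.range' i fuel = i :: List.range' (i + 1) (arr.length - (i + 1)) := by
      rw [← hfi, show arr.length - i = (arr.length - (i + 1)) + 1 by omega, List.range'_succ]
    rw [hcons, List.reverse_cons, List.foldl_append,
        ih (arr.length - (i + 1)) (by omega) (i + 1) rfl (by omega),
        List.foldl_cons, List.foldl_nil]
    set PW := (List.range (arr.length + 1)).map (pwF arr) with hPW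
    set PV := (List.range (arr.length + 1)).map (pvF arr) with hPV
    set g : Nat → Int := fun j => PW.getD j 0 with hg
    set R' := recsF g arr.length (i + 1) with hR'
    have hstack : popWhileB PW (PW.getD (i + 1) 0) R'.reverse.length R'.reverse ++ [i]
        = (recsF g arr.length i).reverse := by
      rw [show R'.reverse.length = R'.length from List.length_reverse,
          popWhileB_rev PW (PW.getD (i + 1) 0) R'.length R' le_rfl]
      rw [show recsF g arr.length i
            = i :: R'.dropWhile (fun j => decide (g (j + 1) ≤ g (i + 1))) from by
        rw [recsF, dif_pos h]]
      rw [List.reverse_cons]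
    unfold stepB
    simp only []
    rw [hstack]
    have hval : valB K PW PV arr.length ((recsF g arr.length i).reverse) i
        = fvalSpec (arr.drop i) K := valB_eq arr K i h
    rw [show bestSpecF (fun j => fvalSpec (arr.drop j) K) N arr.length i
          = if (i : Int) < N then
              some (match bestSpecF (fun j => fvalSpec (arr.drop j) K) N arr.length (i + 1) with
                | none => fvalSpec (arr.drop i) K
                | some bb => if bb < fvalSpec (arr.drop i) K then fvalSpec (arr.drop i) K else bb)
            else bestSpecF (fun j => fvalSpec (arr.drop j) K) N arr.length (i + 1) from by
      rw [bestSpecF, dif_pos h]]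
    by_cases hN : (i : Int) < N
    · rw [if_pos hN, if_pos hN]
      rcases hb : bestSpecF (fun j => fvalSpec (arr.drop j) K) N arr.length (i + 1) with _ | bb
      · simp only [hval]
      · simp only [hval]
    · rw [if_neg hN, if_neg hN]
  · have hieq : i = arr.length := by omega
    subst hieq
    have hf0 : fuel = 0 := by omega
    subst hf0
    rw [show List.range' arr.length 0 = ([] : List Nat) from rfl]
    rw [recsF, dif_neg (by omega), bestSpecF, dif_neg (by omega)]
    rfl

-- bestSpecF's value is a maximum of the candidate set
lemma bestSpecF_char (vals : Nat → Int) (N : Int) (Lc : Nat) (hN : 0 ≤ N) :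
    ∀ i,
      (bestSpecF vals N Lc i = none ↔ (min N.toNat Lc ≤ i ∧ (Lc : Int) ≥ N)) ∧
      (∀ m, bestSpecF vals N Lc i = some m →
        ((∃ j, i ≤ j ∧ j < min N.toNat Lc ∧ m = vals j) ∨ ((Lc : Int) < N ∧ m = 0)) ∧
        (∀ j, i ≤ j → j < min N.toNat Lc → vals j ≤ m) ∧ ((Lc : Int) < N → 0 ≤ m)) := by
  intro i
  induction hfi : Lc - i using Nat.strong_induction_on generalizing i with
  | _ fuel ih =>
  by_cases h : i < Lc
  · have IH := ih (Lc - (i + 1)) (by omega) (i + 1) rfl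
    rw [bestSpecF, dif_pos h]
    by_cases hNi : (i : Int) < N
    · have hiN : i < N.toNat := by omega
      rw [if_pos hNi]
      constructor
      · constructor
        · intro hc; simp at hc
        · intro ⟨h1, h2⟩
          omega
      · intro m hm
        rcases hb : bestSpecF vals N Lc (i + 1) with _ | bb
        · rw [hb] at hm
          have hnone := IH.1.mp hb
          simp only [Option.some.injEq] at hm
          subst hm
          refine ⟨Or.inl ⟨i, le_rfl, by omega, rfl⟩, ?_, ?_⟩
          · intro j hj1 hj2
            have : j = i := by omega
            subst this
            exact le_rfl
          · intro hc
            omega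
        · rw [hb] at hm
          have hsome := IH.2 bb hb
          simp only [Option.some.injEq] at hm
          obtain ⟨hex, hbd, hnn⟩ := hsome
          by_cases hlt : bb < vals i
          · rw [if_pos hlt] at hm
            subst hm
            refine ⟨Or.inl ⟨i, le_rfl, by omega, rfl⟩, ?_, ?_⟩
            · intro j hj1 hj2
              rcases Nat.eq_or_lt_of_le hj1 with rfl | hj
              · exact le_rfl
              · exact le_trans (hbd j (by omega) hj2) (le_of_lt hlt)
            · intro hc
              exact le_trans (hnn hc) (le_of_lt hlt)
          · rw [if_neg hlt] at hm
            subst hm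
            refine ⟨?_, ?_, hnn⟩
            · rcases hex with ⟨j, hj1, hj2, hj3⟩ | ⟨hc, hz⟩
              · exact Or.inl ⟨j, by omega, hj2, hj3⟩
              · exact Or.inr ⟨hc, hz⟩
            · intro j hj1 hj2
              rcases Nat.eq_or_lt_of_le hj1 with rfl | hj
              · omega
              · exact hbd j (by omega) hj2
    · rw [if_neg hNi]
      have hiN : N.toNat ≤ i := by omega
      constructor
      · rw [IH.1]
        constructor
        · intro ⟨h1, h2⟩; exact ⟨by omega, h2⟩
        · intro ⟨h1, h2⟩; exact ⟨by omega, h2⟩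
      · intro m hm
        obtain ⟨hex, hbd, hnn⟩ := IH.2 m hm
        refine ⟨?_, ?_, hnn⟩
        · rcases hex with ⟨j, hj1, hj2, hj3⟩ | hc
          · omega
          · exact Or.inr hc
        · intro j hj1 hj2
          omega
  · rw [bestSpecF, dif_neg h]
    by_cases hLN : (Lc : Int) < N
    · rw [if_pos hLN]
      refine ⟨⟨fun hc => by simp at hc, fun ⟨h1, h2⟩ => by omega⟩, ?_⟩
      intro m hm
      simp only [Option.some.injEq] at hm
      subst hm
      exact ⟨Or.inr ⟨hLN, rfl⟩, fun j hj1 hj2 => by omega, fun _ => le_rfl⟩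
    · rw [if_neg hLN]
      exact ⟨⟨fun _ => ⟨by omega, by omega⟩, fun _ => rfl⟩, fun m hm => by simp at hm⟩

-- ===== VERDICT (by name: the statement is the Claim_ definition above) =====
theorem program_25_spec : Claim_equal_program_25 := by
  intro N K V W _ hpre
  obtain ⟨hN, hcnt⟩ := hpre
  unfold Spec_program_25 program_25 program_25_alt
  dsimp only
  have hzlen : (List.zip W V).length = min W.length V.length := List.length_zip
  have hslen : (PySem.List.sorted (List.zip W V) (fun x => x.1) false).length = (List.zip W V).length :=
    PySem.List.length_sorted _ _ _
  set arr := PySem.List.sorted (List.zip W V) (fun x => x.1) false with harr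
  have hs : arr.Pairwise (fun p q => p.1 ≤ q.1) := PySem.List.sorted_pairwise _ _
  -- starts at positions ≥ min(N, len) never fit anything (this is exactly why A returns)
  have hdead : ∀ i, min N.toNat arr.length ≤ i → ∀ hi : i < arr.length, ¬ arr[i].1 ≤ K := by
    intro i hti hi hK
    have hML : N.toNat < arr.length := by omega
    have hNi : (i : Int) ≥ N := by omega
    have hc2 : (((W.take (min W.length V.length)).countP (fun w => w ≤ K) : Nat) : Int) ≤ N := by
      rcases hcnt with hc | hc
      · omega
      · exact hc
    have hmono : ∀ j, j ≤ i → ∀ hj : j < arr.length, arr[j].1 ≤ K := by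
      intro j hji hj
      exact le_trans (PySem.List.key_sorted_getElem_mono (W.zip V) (fun x => x.1) hji hi) hK
    have htake : (arr.take (i + 1)).countP (fun p => p.1 ≤ K) = i + 1 := by
      rw [List.countP_eq_length.mpr ?_]
      · simp; omega
      · intro x hx
        obtain ⟨j, hj, rfl⟩ := List.mem_iff_getElem.mp hx
        have hj' : j < arr.length := by simp at hj; omega
        have hji : j ≤ i := by simp at hj; omega
        rw [List.getElem_take]
        simpa using hmono j hji hj'
    have hsplit : arr.countP (fun p => p.1 ≤ K)
        = (arr.take (i + 1)).countP (fun p => p.1 ≤ K) + (arr.drop (i + 1)).countP (fun p => p.1 ≤ K) := by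
      conv_lhs => rw [← List.take_append_drop (i + 1) arr]
      exact List.countP_append
    have hperm : arr.Perm (W.zip V) := PySem.List.sorted_perm _ _ _
    have hcc : arr.countP (fun p => p.1 ≤ K) = (W.take (min W.length V.length)).countP (fun w => w ≤ K) := by
      rw [hperm.countP_congr (fun x _ => rfl), ← map_fst_zip_take W V, List.countP_map]
      rfl
    have : (i : Int) + 1 ≤ N := by
      have h1 : i + 1 ≤ arr.countP (fun p => p.1 ≤ K) := by omega
      rw [hcc] at h1
      omega
    omega
  have hinit : (PySem.List.pyRange 0 N 1).foldl (fun sv _ => sv ++ [(0 : Int)]) []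
      = List.replicate N.toNat (0 : Int) := by
    rw [PySem.List.foldl_append_singleton_eq_map (f := fun _ => (0 : Int))]
    simp [List.map_const', PySem.List.length_pyRange_one]
  rw [hinit, outer_inv arr K N.toNat hs hdead arr.length le_rfl]
  dsimp only
  -- A's slots hold the first-crossing values of the live starts
  have hTT : min arr.length (min N.toNat arr.length) = min N.toNat arr.length := by omega
  rw [hTT]
  have hmapeq : (List.range (min N.toNat arr.length)).map (fun i => greedyB (arr.drop i) K 0)
      = (List.range (min N.toNat arr.length)).map (fun i => fvalSpec (arr.drop i) K) := by
    apply List.map_congr_left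
    intro j _
    rw [greedyB_eq_fval (arr.drop j) hs.drop K 0, zero_add]
  rw [hmapeq]
  -- B's loop: prefix sums + record stack + binary search = bestSpecF over the same values
  rw [prefix_build arr]
  dsimp only
  rw [show List.range arr.length = List.range' 0 (arr.length - 0) from by
        rw [Nat.sub_zero, List.range_eq_range'],
      loop_inv arr N K 0 (by omega)]
  dsimp only
  set vals : Nat → Int := fun j => fvalSpec (arr.drop j) K with hvals
  set T := min N.toNat arr.length with hT
  set lA := (List.range T).map vals ++ List.replicate (N.toNat - T) (0 : Int) with hlA
  clear_value vals T lA
  rcases hB : bestSpecF vals N arr.length 0 with _ | m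
  · exfalso
    have := (bestSpecF_char vals N arr.length (by omega) 0).1.mp hB
    omega
  · obtain ⟨hex, hbd, hnn⟩ := (bestSpecF_char vals N arr.length (by omega) 0).2 m hB
    have hlen : lA.length = N.toNat := by
      rw [hlA, List.length_append, List.length_map, List.length_range, List.length_replicate]
      clear hex hbd hnn
      omega
    have hne : lA ≠ [] := by
      intro hc
      rw [hc] at hlen
      simp at hlen
      omega
    rcases hA : PySem.List.max? lA (fun y => y) with _ | mA
    · exfalso
      rcases hlc : lA with _ | ⟨a, t⟩
      · exact hne hlc
      · rw [hlc, PySem.List.max?_id_cons] at hA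
        simp at hA
    · simp only [Option.getD_some]
      have hmem : mA ∈ lA := PySem.List.max?_mem hA
      have hmax : ∀ y ∈ lA, y ≤ mA := PySem.List.max?_isMax hA
      have h1 : mA ≤ m := by
        rcases List.mem_append.mp (by rw [← hlA]; exact hmem) with hmm | hmm
        · obtain ⟨j, hj, rfl⟩ := List.mem_map.mp hmm
          have hjT : j < T := List.mem_range.mp hj
          exact hbd j (by clear hex hnn; omega) (by clear hex hnn; omega)
        · have hz := List.eq_of_mem_replicate hmm
          have hrep : N.toNat - T ≠ 0 := by
            intro hc
            rw [hc] at hmm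
            simp at hmm
          have hLN : (arr.length : Int) < N := by clear hex hbd hnn; omega
          rw [hz]
          exact hnn hLN
      have h2 : m ≤ mA := by
        rcases hex with ⟨j, hj0, hjT, rfl⟩ | ⟨hLN, rfl⟩
        · exact hmax _ (by
            rw [hlA]
            exact List.mem_append_left _ (List.mem_map.mpr ⟨j, List.mem_range.mpr (by omega), rfl⟩))
        · apply hmax 0
          rw [hlA]
          exact List.mem_append_right _ (List.mem_replicate.mpr ⟨by clear hbd hnn; omega, rfl⟩)
      exact le_antisymm h1 h2
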